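-- pv_equiv track=rewrite | github.com/KhalidEzzeldeen/Parsing | CYK.py | create_prod_combinations
-- ===== SOURCE A (Python) =====
-- def create_prod_combinations(prod, nt, count):
--         numset = 1 << count
--         new_prods = []
--
--         for i in range(numset):
--             nth_nt = 0
--             new_prod = ''
--             for s in prod:
--                 if s == nt:
--                     if i & (1 << nth_nt):
--                         new_prod = new_prod+s
--                     nth_nt += 1
--                 else:
--                     new_prod = new_prod+s
--             new_prods.append(new_prod)
--         return new_prods
-- ===== SOURCE B (Python) =====
-- def create_prod_combinations(prod, nt, count):
--     # one scan to split prod into the chunks between nt occurrences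
--     segments = []
--     cur = ''
--     for s in prod:
--         if s == nt:
--             segments.append(cur)
--             cur = ''
--         else:
--             cur += s
--     segments.append(cur)
--     occ = len(segments) - 1
--     new_prods = []
--     for i in range(1 << count):
--         parts = [segments[0]]
--         for j in range(occ):
--             if i & (1 << j):
--                 parts.append(nt)
--             parts.append(segments[j + 1])
--         new_prods.append(''.join(parts))
--     return new_prods
-- ===== Notes on version B (the rewrite author's own statement) =====
-- stated objective: alternative
-- what changed: B splits prod once into the chunks between nt occurrences and assembles each mask's string from those precomputed chunks with join, instead of rescanning every character of prod for every mask.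
import Mathlib
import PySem

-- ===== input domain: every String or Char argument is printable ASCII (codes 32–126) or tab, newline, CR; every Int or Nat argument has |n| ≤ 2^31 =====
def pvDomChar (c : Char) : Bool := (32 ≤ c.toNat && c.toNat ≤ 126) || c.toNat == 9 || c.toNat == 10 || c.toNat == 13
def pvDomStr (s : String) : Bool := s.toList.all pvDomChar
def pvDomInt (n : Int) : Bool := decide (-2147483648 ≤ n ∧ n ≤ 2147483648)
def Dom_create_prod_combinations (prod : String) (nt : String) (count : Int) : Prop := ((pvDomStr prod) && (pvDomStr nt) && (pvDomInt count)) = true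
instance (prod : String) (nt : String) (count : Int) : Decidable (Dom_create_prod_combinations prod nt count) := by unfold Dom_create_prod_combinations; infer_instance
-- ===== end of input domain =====

-- B precomputes the text chunks between nt occurrences once and assembles each mask's
-- string from those chunks, instead of rescanning all of prod for every mask (objective: alternative).

-- ===== PORT A =====
-- inner 'for s in prod' loop: state = (nth_nt, new_prod); branches in source order
def cpcA_scan (nt : String) (i : Int) : List Char → Nat → List Char → List Char
  | [], _, acc => acc
  | c :: cs, k, acc =>
    if String.ofList [c] = nt then
      -- 'i & (1 << nth_nt)': Python's 1 << k is (1 : Int) <<< k, & is PySem.Int.band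
      cpcA_scan nt i cs (k + 1)
        (if PySem.Int.band i ((1 : Int) <<< k) ≠ 0 then acc ++ [c] else acc)
    else
      cpcA_scan nt i cs k (acc ++ [c])

def create_prod_combinations (prod : String) (nt : String) (count : Int) : List String :=
  -- numset = 1 << count (count ≥ 0 by Pre_; Python raises on negative count)
  let numset : Int := (1 : Int) <<< count.toNat
  (PySem.List.pyRange 0 numset 1).map (fun i => String.ofList (cpcA_scan nt i prod.toList 0 []))

-- ===== PORT B =====
-- 'for j in range(occ)' assembly loop of Source B: parts kept as the already-joined accumulator
def cpcB_asm (nt : String) (i : Int) : List (List Char) → Nat → List Char → List Char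
  | [], _, acc => acc
  | s :: ss, j, acc =>
    cpcB_asm nt i ss (j + 1)
      ((if PySem.Int.band i ((1 : Int) <<< j) ≠ 0 then acc ++ nt.toList else acc) ++ s)

def create_prod_combinations_alt (prod : String) (nt : String) (count : Int) : List String :=
  -- one scan building the chunks between nt occurrences: state = (finished segments, current chunk)
  let st := prod.toList.foldl
    (fun (st : List (List Char) × List Char) c =>
      if String.ofList [c] = nt then (st.1 ++ [st.2], []) else (st.1, st.2 ++ [c]))
    ([], [])
  let segments : List (List Char) := st.1 ++ [st.2]
  let numset : Int := (1 : Int) <<< count.toNat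
  match segments with
  | [] => []   -- unreachable: segments always nonempty
  | s0 :: rest =>
    (PySem.List.pyRange 0 numset 1).map (fun i => String.ofList (cpcB_asm nt i rest 0 s0))

-- ===== PRECONDITION & SPEC =====
-- Pre_ excludes only count < 0, where Python's '1 << count' raises ValueError.
def Pre_create_prod_combinations (prod : String) (nt : String) (count : Int) : Prop := 0 ≤ count
instance (prod : String) (nt : String) (count : Int) : Decidable (Pre_create_prod_combinations prod nt count) := by unfold Pre_create_prod_combinations; infer_instance

def pvWitness_create_prod_combinations : String × String × Int := ("aAb", "A", 1)

def Spec_create_prod_combinations (prod : String) (nt : String) (count : Int) (out : List String) : Prop := out = create_prod_combinations_alt prod nt count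
instance (prod : String) (nt : String) (count : Int) (out : List String) : Decidable (Spec_create_prod_combinations prod nt count out) := by unfold Spec_create_prod_combinations; infer_instance

-- ===== CLAIM (what is proved, stated in full; the proofs are below) =====
def Claim_equal_create_prod_combinations : Prop := ∀ (prod : String) (nt : String) (count : Int), Dom_create_prod_combinations prod nt count → Pre_create_prod_combinations prod nt count → Spec_create_prod_combinations prod nt count (create_prod_combinations prod nt count)

-- ===== LEMMAS AND PROOFS =====

-- recursive characterisation of B's segment scan: (current chunk, remaining chunks)
def pvSegs (nt : String) : List Char → List Char × List (List Char)
  | [] => ([], [])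
  | c :: cs =>
    let p := pvSegs nt cs
    if String.ofList [c] = nt then ([], p.1 :: p.2) else (c :: p.1, p.2)

lemma pvSegs_foldl (nt : String) (cs : List Char) :
    ∀ (done : List (List Char)) (cur : List Char),
    (cs.foldl (fun (st : List (List Char) × List Char) c =>
        if String.ofList [c] = nt then (st.1 ++ [st.2], []) else (st.1, st.2 ++ [c])) (done, cur)).1
      ++ [(cs.foldl (fun (st : List (List Char) × List Char) c =>
        if String.ofList [c] = nt then (st.1 ++ [st.2], []) else (st.1, st.2 ++ [c])) (done, cur)).2]
    = done ++ (cur ++ (pvSegs nt cs).1) :: (pvSegs nt cs).2 := by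
  induction cs with
  | nil => simp [pvSegs]
  | cons c cs ih =>
    intro done cur
    by_cases h : String.ofList [c] = nt
    · simp only [List.foldl_cons, pvSegs, h, if_true]
      rw [ih (done ++ [cur]) []]
      simp
    · simp only [List.foldl_cons, pvSegs, h, if_false]
      rw [ih done (cur ++ [c])]
      simp

lemma pvScan_asm (nt : String) (i : Int) (cs : List Char) :
    ∀ (k : Nat) (acc : List Char),
    cpcA_scan nt i cs k acc = cpcB_asm nt i (pvSegs nt cs).2 k (acc ++ (pvSegs nt cs).1) := by
  induction cs with
  | nil => intro k acc; simp [cpcA_scan, pvSegs, cpcB_asm]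
  | cons c cs ih =>
    intro k acc
    by_cases h : String.ofList [c] = nt
    · have hnt : nt.toList = [c] := by
        rw [← h]
        first
          | simp
          | exact String.toList_ofList [c]
          | rfl
          | simp [String.ofList]
      simp only [cpcA_scan, pvSegs, h, if_true, cpcB_asm]
      rw [ih (k + 1)]
      by_cases hb : PySem.Int.band i ((1 : Int) <<< k) ≠ 0
      · simp [hb, hnt]
      · simp [hb]
    · simp only [cpcA_scan, pvSegs, h, if_false]
      rw [ih k (acc ++ [c])]
      simp

-- ===== VERDICT (by name: the statement is the Claim_ definition above) =====
theorem create_prod_combinations_spec : Claim_equal_create_prod_combinations := by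
  intro prod nt count _ _
  unfold Spec_create_prod_combinations create_prod_combinations create_prod_combinations_alt
  have hseg := pvSegs_foldl nt prod.toList [] []
  cases hfold : prod.toList.foldl
      (fun (st : List (List Char) × List Char) c =>
        if String.ofList [c] = nt then (st.1 ++ [st.2], []) else (st.1, st.2 ++ [c])) ([], []) with
  | mk d c' =>
    rw [hfold] at hseg
    simp only [List.nil_append] at hseg
    dsimp only
    rw [hseg]
    dsimp only
    apply List.map_congr_left
    intro i _
    rw [pvScan_asm]
    simp
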